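-- pv_equiv track=rewrite | github.com/Minerstove/Python | Prac6/6f.py | num_lunch
-- ===== SOURCE A (Python) =====
-- def num_lunch(ulams,drinks):
--     ulams = list(ulams)
--     drinks = list(drinks)
--     paired = 0
--     used_ulams = [False] * len(ulams)
--     used_drinks = [False] * len(drinks)
--
--     for i in range(len(ulams)):
--         for j in range(len(drinks)):
--             if not used_ulams[i] and not used_drinks[j]:
--                 if (ulams[i] + drinks[j]) % 2 != 1:
--                     pass
--                 else:
--                     paired += 1
--                     used_ulams[i] = True
--                     used_drinks[j] = True
--
--     return paired
-- ===== SOURCE B (Python) =====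
-- def num_lunch(ulams, drinks):
--     eu = sum(1 for u in ulams if u % 2 == 0)
--     ou = len(ulams) - eu
--     ed = sum(1 for d in drinks if d % 2 == 0)
--     od = len(drinks) - ed
--     return min(eu, od) + min(ou, ed)
-- ===== Notes on version B (the rewrite author's own statement) =====
-- stated objective: faster
-- what changed: Replaces the quadratic nested greedy scan over boolean 'used' arrays by a single counting pass: each list's even/odd tallies determine the answer as min(eu,od)+min(ou,ed).
import Mathlib
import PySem

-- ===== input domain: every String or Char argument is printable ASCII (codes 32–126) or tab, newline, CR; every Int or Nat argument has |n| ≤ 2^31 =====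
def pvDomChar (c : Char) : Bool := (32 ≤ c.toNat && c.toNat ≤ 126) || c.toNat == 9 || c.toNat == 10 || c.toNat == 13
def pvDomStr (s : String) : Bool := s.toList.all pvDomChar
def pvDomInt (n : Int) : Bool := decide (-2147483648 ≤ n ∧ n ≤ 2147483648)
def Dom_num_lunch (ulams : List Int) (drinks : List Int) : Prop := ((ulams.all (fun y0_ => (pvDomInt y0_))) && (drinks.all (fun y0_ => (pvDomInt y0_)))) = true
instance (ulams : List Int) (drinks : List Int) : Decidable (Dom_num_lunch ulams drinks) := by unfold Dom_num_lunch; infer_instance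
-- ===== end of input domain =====

-- B replaces A's quadratic nested greedy scan by a single even/odd counting pass (measured asymptotically faster).

-- ===== PORT A =====
-- Literal port of A: nested loops over index ranges with 'used' boolean lists;
-- all indices produced by range(len(..)) are in range, so pyGetD/pySetD are exact here.
def num_lunch (ulams : List Int) (drinks : List Int) : Int :=
  let init : Int × List Bool × List Bool :=
    (0, PySem.List.pyRepeat [false] (PySem.List.len ulams),
        PySem.List.pyRepeat [false] (PySem.List.len drinks))
  let fin := (PySem.List.pyRange 0 (PySem.List.len ulams) 1).foldl
    (fun s i =>
      (PySem.List.pyRange 0 (PySem.List.len drinks) 1).foldl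
        (fun t j =>
          if (!(PySem.List.pyGetD t.2.1 i true) && !(PySem.List.pyGetD t.2.2 j true)) = true then
            if PySem.Int.mod (PySem.List.pyGetD ulams i 0 + PySem.List.pyGetD drinks j 0) 2 ≠ 1 then t
            else (t.1 + 1, PySem.List.pySetD t.2.1 i true, PySem.List.pySetD t.2.2 j true)
          else t)
        s)
    init
  fin.1

-- ===== PORT B =====
-- Port of Source B: count evens in each list, answer = min(eu,od)+min(ou,ed).
def num_lunch_alt (ulams : List Int) (drinks : List Int) : Int :=
  let eu : Int := ulams.countP (fun u => PySem.Int.mod u 2 == 0)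
  let ou : Int := PySem.List.len ulams - eu
  let ed : Int := drinks.countP (fun d => PySem.Int.mod d 2 == 0)
  let od : Int := PySem.List.len drinks - ed
  min eu od + min ou ed

-- ===== PRECONDITION & SPEC =====
def Spec_num_lunch (ulams : List Int) (drinks : List Int) (out : Int) : Prop := out = num_lunch_alt ulams drinks
instance (ulams : List Int) (drinks : List Int) (out : Int) : Decidable (Spec_num_lunch ulams drinks out) := by unfold Spec_num_lunch; infer_instance

-- ===== CLAIM (what is proved, stated in full; the proofs are below) =====
def Claim_equal_num_lunch : Prop := ∀ (ulams : List Int) (drinks : List Int), Dom_num_lunch ulams drinks → Spec_num_lunch ulams drinks (num_lunch ulams drinks)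

-- ===== LEMMAS AND PROOFS =====

-- Nat-indexed version of A's inner-loop body (the port's body after casting indices).
def pvBody (ulams drinks : List Int) (i : Nat) (t : Int × List Bool × List Bool) (j : Nat) :
    Int × List Bool × List Bool :=
  if (!(t.2.1.getD i true) && !(t.2.2.getD j true)) = true then
    if PySem.Int.mod (ulams.getD i 0 + drinks.getD j 0) 2 ≠ 1 then t
    else (t.1 + 1, t.2.1.set i true, t.2.2.set j true)
  else t

-- Greedy model on (drink, used) pairs: mark the first available opposite-parity drink.
def pvMark (u : Int) : List (Int × Bool) → Option (List (Int × Bool))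
  | [] => none
  | (d, b) :: rest =>
    if (!b && (PySem.Int.mod (u + d) 2 == 1)) = true then some ((d, true) :: rest)
    else (pvMark u rest).map ((d, b) :: ·)

def pvRun (us : List Int) (pr : List (Int × Bool)) (p : Int) : Int :=
  match us with
  | [] => p
  | u :: us' =>
    match pvMark u pr with
    | none => pvRun us' pr p
    | some pr' => pvRun us' pr' (p + 1)

def pvAvail (q : Int) (pr : List (Int × Bool)) : Nat :=
  pr.countP (fun x => !x.2 && (PySem.Int.mod x.1 2 == q))

def pvCnt (q : Int) (us : List Int) : Nat :=
  us.countP (fun u => PySem.Int.mod u 2 == q)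

theorem pv_mod2 (a : Int) : PySem.Int.mod a 2 = a % 2 :=
  PySem.Int.mod_eq_emod_of_pos (by norm_num)

theorem pv_mod2_cases (a : Int) : PySem.Int.mod a 2 = 0 ∨ PySem.Int.mod a 2 = 1 := by
  rw [pv_mod2]; omega

theorem pv_count_split (l : List Int) :
    l.countP (fun u => PySem.Int.mod u 2 == 0) + l.countP (fun u => PySem.Int.mod u 2 == 1) = l.length := by
  induction l with
  | nil => simp
  | cons a l ih =>
    rw [List.countP_cons, List.countP_cons, List.length_cons]
    rcases pv_mod2_cases a with h | h
    · rw [if_pos (by rw [h]; rfl), if_neg (by rw [h]; decide)]; omega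
    · rw [if_neg (by rw [h]; decide), if_pos (by rw [h]; rfl)]; omega

theorem pv_test_eq (u d : Int) (b : Bool) :
    (!b && (PySem.Int.mod (u + d) 2 == 1)) = (!b && (PySem.Int.mod d 2 == (1 - PySem.Int.mod u 2))) := by
  cases b <;> simp [pv_mod2] <;> omega

theorem pv_mark_cons_pos (u d : Int) (b : Bool) (rest : List (Int × Bool))
    (hc : (!b && (PySem.Int.mod (u + d) 2 == 1)) = true) :
    pvMark u ((d, b) :: rest) = some ((d, true) :: rest) := by
  simp only [pvMark]; rw [if_pos hc]

theorem pv_mark_cons_neg (u d : Int) (b : Bool) (rest : List (Int × Bool))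
    (hc : ¬ (!b && (PySem.Int.mod (u + d) 2 == 1)) = true) :
    pvMark u ((d, b) :: rest) = (pvMark u rest).map ((d, b) :: ·) := by
  simp only [pvMark]; rw [if_neg hc]

theorem pv_avail_cons (q d : Int) (b : Bool) (rest : List (Int × Bool)) :
    pvAvail q ((d, b) :: rest) =
      pvAvail q rest + (if (!b && (PySem.Int.mod d 2 == q)) = true then 1 else 0) := by
  simp only [pvAvail, List.countP_cons]

theorem pv_mark_none (u : Int) (pr : List (Int × Bool)) :
    pvMark u pr = none ↔ pvAvail (1 - PySem.Int.mod u 2) pr = 0 := by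
  induction pr with
  | nil => simp [pvMark, pvAvail]
  | cons x rest ih =>
    obtain ⟨d, b⟩ := x
    by_cases hc : (!b && (PySem.Int.mod (u + d) 2 == 1)) = true
    · have hh : (!b && (PySem.Int.mod d 2 == (1 - PySem.Int.mod u 2))) = true := by
        rw [← pv_test_eq]; exact hc
      rw [pv_mark_cons_pos u d b rest hc, pv_avail_cons, if_pos hh]
      simp
    · have hh : (!b && (PySem.Int.mod d 2 == (1 - PySem.Int.mod u 2))) = false := by
        rw [← pv_test_eq]; exact Bool.eq_false_iff.mpr hc
      rw [pv_mark_cons_neg u d b rest hc, pv_avail_cons, if_neg (by rw [hh]; exact Bool.false_ne_true),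
        Option.map_eq_none_iff, Nat.add_zero]
      exact ih

theorem pv_mark_some (u : Int) (pr pr' : List (Int × Bool)) (h : pvMark u pr = some pr') :
    pvAvail (1 - PySem.Int.mod u 2) pr = pvAvail (1 - PySem.Int.mod u 2) pr' + 1 ∧
    (∀ q, q ≠ 1 - PySem.Int.mod u 2 → pvAvail q pr' = pvAvail q pr) ∧
    pr'.map Prod.fst = pr.map Prod.fst := by
  induction pr generalizing pr' with
  | nil => simp [pvMark] at h
  | cons x rest ih =>
    obtain ⟨d, b⟩ := x
    by_cases hc : (!b && (PySem.Int.mod (u + d) 2 == 1)) = true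
    · have hh : (!b && (PySem.Int.mod d 2 == (1 - PySem.Int.mod u 2))) = true := by
        rw [← pv_test_eq]; exact hc
      obtain ⟨hb, hm⟩ : b = false ∧ PySem.Int.mod d 2 = 1 - PySem.Int.mod u 2 := by
        simpa using hh
      rw [pv_mark_cons_pos u d b rest hc] at h
      obtain rfl : pr' = (d, true) :: rest := by simpa using h.symm
      refine ⟨?_, ?_, ?_⟩
      · rw [pv_avail_cons, pv_avail_cons, if_pos hh]
        simp
      · intro q hq
        rw [pv_mod2 d, pv_mod2 u] at hm
        rw [pv_mod2 u] at hq
        have h1 : (!(true : Bool) && (PySem.Int.mod d 2 == q)) = false := by simp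
        have h2 : (!b && (PySem.Int.mod d 2 == q)) = false := by
          rw [hb, pv_mod2 d]
          simp only [Bool.not_false, Bool.true_and, beq_eq_false_iff_ne, ne_eq]
          omega
        rw [pv_avail_cons, pv_avail_cons]
        simp only [h1, h2, Bool.false_eq_true, if_false, Nat.add_zero]
      · simp
    · rw [pv_mark_cons_neg u d b rest hc] at h
      cases hm : pvMark u rest with
      | none => rw [hm] at h; simp at h
      | some pr'' =>
        rw [hm] at h
        obtain rfl : pr' = (d, b) :: pr'' := by simpa using h.symm
        obtain ⟨ih1, ih2, ih3⟩ := ih pr'' hm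
        refine ⟨?_, ?_, ?_⟩
        · rw [pv_avail_cons, pv_avail_cons]; omega
        · intro q hq
          have := ih2 q hq
          rw [pv_avail_cons, pv_avail_cons]; omega
        · simpa using ih3

theorem pv_cnt_cons_0 (u : Int) (us : List Int) (h : PySem.Int.mod u 2 = 0) :
    pvCnt 0 (u :: us) = pvCnt 0 us + 1 ∧ pvCnt 1 (u :: us) = pvCnt 1 us := by
  constructor <;> simp only [pvCnt, List.countP_cons, h] <;> simp

theorem pv_cnt_cons_1 (u : Int) (us : List Int) (h : PySem.Int.mod u 2 = 1) :
    pvCnt 0 (u :: us) = pvCnt 0 us ∧ pvCnt 1 (u :: us) = pvCnt 1 us + 1 := by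
  constructor <;> simp only [pvCnt, List.countP_cons, h] <;> simp

theorem pv_run_formula (us : List Int) (pr : List (Int × Bool)) (p : Int) :
    pvRun us pr p = p + ((min (pvCnt 0 us) (pvAvail 1 pr) : Nat) : Int)
      + ((min (pvCnt 1 us) (pvAvail 0 pr) : Nat) : Int) := by
  induction us generalizing pr p with
  | nil => simp [pvRun, pvCnt]
  | cons u us ih =>
    cases hm : pvMark u pr with
    | none =>
      simp only [pvRun, hm]
      rw [ih]
      have h0 := (pv_mark_none u pr).mp hm
      rcases pv_mod2_cases u with h | h
      · obtain ⟨c0, c1⟩ := pv_cnt_cons_0 u us h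
        rw [h] at h0; norm_num at h0
        omega
      · obtain ⟨c0, c1⟩ := pv_cnt_cons_1 u us h
        rw [h] at h0; norm_num at h0
        omega
    | some pr' =>
      simp only [pvRun, hm]
      rw [ih]
      obtain ⟨h1, h2, _⟩ := pv_mark_some u pr pr' hm
      rcases pv_mod2_cases u with h | h
      · obtain ⟨c0, c1⟩ := pv_cnt_cons_0 u us h
        rw [h] at h1 h2; norm_num at h1 h2
        have h2' := h2 0 (by norm_num)
        omega
      · obtain ⟨c0, c1⟩ := pv_cnt_cons_1 u us h
        rw [h] at h1 h2; norm_num at h1 h2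
        have h2' := h2 1 (by norm_num)
        omega

theorem pv_inner_skip (ulams drinks : List Int) (i : Nat) (p : Int) (uu ud : List Bool)
    (h : uu.getD i true = true) (js : List Nat) :
    js.foldl (pvBody ulams drinks i) (p, uu, ud) = (p, uu, ud) := by
  induction js with
  | nil => rfl
  | cons j js ih =>
    rw [List.foldl_cons]
    have hb : pvBody ulams drinks i (p, uu, ud) j = (p, uu, ud) := by
      rw [List.getD_eq_getElem?_getD] at h
      simp [pvBody, h]
    rw [hb, ih]

theorem pv_inner_bridge (ulams drinks : List Int) (i : Nat) :
    ∀ (c k : Nat) (p : Int) (uu ud : List Bool), k + c = drinks.length →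
      ud.length = drinks.length → i < uu.length → uu.getD i true = false →
      (List.range' k c).foldl (pvBody ulams drinks i) (p, uu, ud) =
        match pvMark (ulams.getD i 0) ((drinks.drop k).zip (ud.drop k)) with
        | none => (p, uu, ud)
        | some pr' => (p + 1, uu.set i true, ud.take k ++ pr'.map Prod.snd) := by
  intro c
  induction c with
  | zero =>
    intro k p uu ud hk hud hi hif
    rw [List.drop_eq_nil_of_le (by omega), List.drop_eq_nil_of_le (by omega)]
    simp [pvMark]
  | succ c ihc =>
    intro k p uu ud hk hud hi hif
    have hklt : k < drinks.length := by omega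
    have hkud : k < ud.length := by omega
    rw [List.range'_succ, List.foldl_cons,
      List.drop_eq_getElem_cons hklt, List.drop_eq_getElem_cons hkud, List.zip_cons_cons]
    have hif' : uu[i]?.getD true = false := by
      rw [← List.getD_eq_getElem?_getD]; exact hif
    have hudk : ud[k]?.getD true = ud[k] := by rw [List.getElem?_eq_getElem hkud]; rfl
    have hgd : ud.getD k true = ud[k] := List.getD_eq_getElem ud true hkud
    have hdd : drinks.getD k 0 = drinks[k] := List.getD_eq_getElem drinks 0 hklt
    by_cases hmatch : (!(ud[k]) && (PySem.Int.mod (ulams.getD i 0 + drinks[k]) 2 == 1)) = true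
    · obtain ⟨hdkf, hmod⟩ : ud[k] = false ∧ PySem.Int.mod (ulams.getD i 0 + drinks[k]) 2 = 1 := by
        simpa using hmatch
      have hbody : pvBody ulams drinks i (p, uu, ud) k = (p + 1, uu.set i true, ud.set k true) := by
        rw [pvBody]
        rw [if_pos (by simp [hif', hudk, hdkf]), if_neg (by rw [hdd, hmod]; simp)]
      rw [hbody]
      have hset : (uu.set i true).getD i true = true := by
        rw [List.getD_eq_getElem?_getD, List.getElem?_set_self hi]
        rfl
      rw [pv_inner_skip ulams drinks i (p + 1) (uu.set i true) (ud.set k true) hset,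
        pv_mark_cons_pos _ _ _ _ hmatch]
      simp only [List.map_cons]
      rw [List.map_snd_zip (by simp; omega)]
      have : ud.set k true = ud.take k ++ true :: ud.drop (k + 1) := by
        rw [List.set_eq_take_append_cons_drop, if_pos hkud]
      rw [this]
    · have hbody : pvBody ulams drinks i (p, uu, ud) k = (p, uu, ud) := by
        by_cases hb : ud[k] = true
        · rw [pvBody, if_neg (by simp [hudk, hb])]
        · have hb' : ud[k] = false := by simpa using hb
          have hmod : ¬ PySem.Int.mod (ulams.getD i 0 + drinks.getD k 0) 2 = 1 := by
            rw [hdd]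
            intro hx
            have hx' : (ulams[i]?.getD 0 + drinks[k]) % 2 = 1 := by
              rw [← List.getD_eq_getElem?_getD, ← pv_mod2]; exact hx
            exact hmatch (by simp [hb', hx'])
          rw [pvBody, if_pos (by simp [hif', hudk, hb']), if_pos hmod]
      rw [hbody, ihc (k + 1) p uu ud (by omega) hud hi hif,
        pv_mark_cons_neg _ _ _ _ hmatch]
      cases hrec : pvMark (ulams.getD i 0) ((drinks.drop (k + 1)).zip (ud.drop (k + 1))) with
      | none => simp
      | some pr'' =>
        simp only [Option.map_some, List.map_cons]
        have : ud.take (k + 1) = ud.take k ++ [ud[k]] := by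
          rw [List.take_add_one, List.getElem?_eq_getElem hkud]
          rfl
        rw [this, List.append_assoc]
        rfl

theorem pv_outer_bridge (ulams drinks : List Int) :
    ∀ (c k : Nat) (p : Int) (uu ud : List Bool), k + c = ulams.length →
      uu.length = ulams.length → ud.length = drinks.length →
      (∀ t, k ≤ t → t < uu.length → uu.getD t true = false) →
      ((List.range' k c).foldl
        (fun s i => (List.range drinks.length).foldl (pvBody ulams drinks i) s) (p, uu, ud)).1 =
        pvRun (ulams.drop k) (drinks.zip ud) p := by
  intro c
  induction c with
  | zero =>
    intro k p uu ud hk huu hud hf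
    rw [List.drop_eq_nil_of_le (by omega)]
    simp [pvRun]
  | succ c ihc =>
    intro k p uu ud hk huu hud hf
    have hkn : k < ulams.length := by omega
    rw [List.range'_succ, List.foldl_cons, List.drop_eq_getElem_cons hkn]
    have hinner := pv_inner_bridge ulams drinks k drinks.length 0 p uu ud (by omega) hud
      (by omega) (hf k le_rfl (by omega))
    simp only [List.drop_zero] at hinner
    rw [← List.range_eq_range'] at hinner
    rw [hinner]
    have hu : ulams.getD k 0 = ulams[k] := List.getD_eq_getElem ulams 0 hkn
    rw [hu] at hinner ⊢
    cases hm : pvMark (ulams[k]) (drinks.zip ud) with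
    | none =>
      simp only [hm, pvRun]
      exact ihc (k + 1) p uu ud (by omega) huu hud (fun t ht htl => hf t (by omega) htl)
    | some pr' =>
      simp only [hm, pvRun, List.take_zero, List.nil_append]
      obtain ⟨_, _, hfst⟩ := pv_mark_some _ _ _ hm
      have hfst' : pr'.map Prod.fst = drinks := by
        rw [hfst, List.map_fst_zip (by omega)]
      have hlen : (pr'.map Prod.snd).length = drinks.length := by
        have := congrArg List.length hfst'
        simpa using this
      have hzip : drinks.zip (pr'.map Prod.snd) = pr' := by
        rw [← hfst']
        exact Eq.symm (List.zip_of_prod rfl rfl)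
      rw [ihc (k + 1) (p + 1) (uu.set k true) (pr'.map Prod.snd) (by omega) (by simpa using huu)
        hlen ?_, hzip]
      intro t ht htl
      have hne : (uu.set k true)[t]? = uu[t]? := List.getElem?_set_ne (by omega)
      rw [List.getD_eq_getElem?_getD, hne, ← List.getD_eq_getElem?_getD]
      exact hf t (by omega) (by simpa using htl)

theorem pv_A_nat (ulams drinks : List Int) :
    num_lunch ulams drinks =
      ((List.range ulams.length).foldl
        (fun s i => (List.range drinks.length).foldl (pvBody ulams drinks i) s)
        (0, List.replicate ulams.length false, List.replicate drinks.length false)).1 := by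
  unfold num_lunch pvBody
  simp only [PySem.List.len_eq, PySem.List.pyRange_zero_nat, PySem.List.pyRepeat_singleton,
    Int.toNat_natCast, List.foldl_map, PySem.List.pyGetD_natCast, PySem.List.pySetD_natCast]

theorem pv_A_eq_run (ulams drinks : List Int) :
    num_lunch ulams drinks =
      pvRun ulams (drinks.zip (List.replicate drinks.length false)) 0 := by
  rw [pv_A_nat]
  have h2 : List.range ulams.length = List.range' 0 ulams.length := List.range_eq_range'
  rw [h2]
  have h := pv_outer_bridge ulams drinks ulams.length 0 0
    (List.replicate ulams.length false) (List.replicate drinks.length false)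
    (by omega) (by simp) (by simp) ?_
  · simpa using h
  · intro t ht htl
    rw [List.getD_eq_getElem (List.replicate ulams.length false) true (by simpa using htl)]
    simp

theorem pv_avail_init (q : Int) (drinks : List Int) :
    pvAvail q (drinks.zip (List.replicate drinks.length false)) =
      drinks.countP (fun d => PySem.Int.mod d 2 == q) := by
  induction drinks with
  | nil => rfl
  | cons d ds ih =>
    rw [List.length_cons, List.replicate_succ, List.zip_cons_cons, pv_avail_cons,
      List.countP_cons, ih]
    simp

-- ===== VERDICT (by name: the statement is the Claim_ definition above) =====
theorem num_lunch_spec : Claim_equal_num_lunch := by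
  intro ulams drinks _
  unfold Spec_num_lunch
  rw [pv_A_eq_run, pv_run_formula]
  simp only [pvCnt, pv_avail_init, num_lunch_alt, PySem.List.len_eq]
  have h1 := pv_count_split ulams
  have h2 := pv_count_split drinks
  omega
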